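-- pv_equiv track=rewrite | github.com/AnonymousDeveloper4201337/TCBot | Inno.py | parse_iss
-- ===== SOURCE A (Python) =====
-- def parse_iss(s):
--     firstline = ''
--     sectionname = ''
--     lines = []
--     for line in s.splitlines():
--         if line.startswith('[') and ']' in line:
--             if lines:
--                 yield firstline, sectionname, lines
--             firstline = line
--             sectionname = line[1:line.index(']')].strip()
--             lines = []
--         else:
--             lines.append(line)
--     if lines:
--         yield firstline, sectionname, lines
-- ===== SOURCE B (Python) =====
-- def parse_iss(s):
--     # Different decomposition: split lines into chunks at header lines, then slice bodies.
--     lines = s.splitlines()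
--     n = len(lines)
--
--     def is_header(line):
--         return line.startswith('[') and ']' in line
--
--     j = 0
--     while j < n and not is_header(lines[j]):
--         j += 1
--     if j > 0:
--         yield '', '', lines[:j]
--     while j < n:
--         header = lines[j]
--         k = j + 1
--         while k < n and not is_header(lines[k]):
--             k += 1
--         body = lines[j + 1:k]
--         if body:
--             yield header, header[1:header.index(']')].strip(), body
--         j = k
-- ===== Notes on version B (the rewrite author's own statement) =====
-- stated objective: alternative
-- what changed: Replaces A's single fold threading a (firstline, sectionname, pending-lines) accumulator state with a chunk decomposition: split the line list at header lines and slice each section body out directly (leading chunk handled once, then one scan per section).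
import Mathlib
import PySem

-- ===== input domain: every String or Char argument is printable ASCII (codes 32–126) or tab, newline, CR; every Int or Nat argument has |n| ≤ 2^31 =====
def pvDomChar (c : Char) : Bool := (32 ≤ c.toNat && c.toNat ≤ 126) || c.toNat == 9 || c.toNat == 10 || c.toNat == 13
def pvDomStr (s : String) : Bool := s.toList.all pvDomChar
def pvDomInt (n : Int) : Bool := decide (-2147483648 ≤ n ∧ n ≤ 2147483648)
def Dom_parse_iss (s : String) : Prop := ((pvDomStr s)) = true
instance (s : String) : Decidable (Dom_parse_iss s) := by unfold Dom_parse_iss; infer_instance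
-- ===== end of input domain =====

-- B changes the decomposition: instead of one fold threading (firstline, name, lines)
-- accumulator state, B splits the line list into chunks at header lines and slices each
-- body out directly (objective: alternative decomposition, same cost).
-- Both Pythons are generators; the ports list their yielded values in order.

-- ===== PORT A =====
-- line.startswith('[') and ']' in line
def pvIsHeader (line : String) : Bool :=
  PySem.Str.startswith line "[" && PySem.Str.isIn "]" line

-- line[1:line.index(']')].strip() — guarded by ']' in line, so find ≠ -1
def pvSectionName (line : String) : String :=
  PySem.Str.strip (PySem.Str.slice line (some 1) (some (PySem.Str.find line "]")))

-- the for-loop of A, threading (firstline, sectionname, lines) and the yielded list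
def parse_iss_go (firstline sectionname : String) (lines : List String) :
    List String → List (String × String × List String)
  | [] => if lines ≠ [] then [(firstline, sectionname, lines)] else []
  | line :: rest =>
    if pvIsHeader line then
      (if lines ≠ [] then [(firstline, sectionname, lines)] else []) ++
        parse_iss_go line (pvSectionName line) [] rest
    else
      parse_iss_go firstline sectionname (lines ++ [line]) rest

def parse_iss (s : String) : List (String × String × List String) :=
  parse_iss_go "" "" [] (PySem.Str.splitlines s)

-- ===== PORT B =====
-- one section chunk after another: at a header line, scan forward to the next header
-- (takeWhile/dropWhile = the inner while-loop of Source B) and slice the body out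
def parse_iss_chunks : List String → List (String × String × List String)
  | [] => []
  | header :: rest =>
    let body := rest.takeWhile (fun l => !pvIsHeader l)
    let rest' := rest.dropWhile (fun l => !pvIsHeader l)
    (if body ≠ [] then [(header, pvSectionName header, body)] else []) ++
      parse_iss_chunks rest'
  termination_by ls => ls.length
  decreasing_by
    have := List.length_dropWhile_le (p := fun l => !pvIsHeader l) (l := rest)
    simp only [List.length_cons]; omega

def parse_iss_alt (s : String) : List (String × String × List String) :=
  let lines := PySem.Str.splitlines s
  let lead := lines.takeWhile (fun l => !pvIsHeader l)
  let rest := lines.dropWhile (fun l => !pvIsHeader l)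
  (if lead ≠ [] then [("", "", lead)] else []) ++ parse_iss_chunks rest

-- ===== PRECONDITION & SPEC =====
def Spec_parse_iss (s : String) (out : List (String × String × List String)) : Prop := out = parse_iss_alt s
instance (s : String) (out : List (String × String × List String)) : Decidable (Spec_parse_iss s out) := by unfold Spec_parse_iss; infer_instance

-- ===== CLAIM (what is proved, stated in full; the proofs are below) =====
def Claim_equal_parse_iss : Prop := ∀ (s : String), Dom_parse_iss s → Spec_parse_iss s (parse_iss s)

-- ===== LEMMAS AND PROOFS =====

-- A's fold from any accumulator state = 'flush the pending chunk, then B's chunk recursion'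
theorem parse_iss_go_eq (ls : List String) :
    ∀ (f n : String) (acc : List String),
      parse_iss_go f n acc ls =
        (if acc ++ ls.takeWhile (fun l => !pvIsHeader l) ≠ [] then
            [(f, n, acc ++ ls.takeWhile (fun l => !pvIsHeader l))] else []) ++
          parse_iss_chunks (ls.dropWhile (fun l => !pvIsHeader l)) := by
  induction ls with
  | nil =>
    intro f n acc
    rw [parse_iss_chunks.eq_def]
    simp [parse_iss_go]
  | cons l rest ih =>
    intro f n acc
    by_cases h : pvIsHeader l = true
    · rw [parse_iss_go, if_pos h, ih]
      rw [List.takeWhile_cons, List.dropWhile_cons]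
      conv_rhs => rw [parse_iss_chunks.eq_def]
      simp [h]
    · rw [parse_iss_go, if_neg h, ih]
      rw [List.takeWhile_cons, List.dropWhile_cons]
      simp [h]

-- ===== VERDICT (by name: the statement is the Claim_ definition above) =====
theorem parse_iss_spec : Claim_equal_parse_iss := by
  intro s _
  show parse_iss s = parse_iss_alt s
  rw [parse_iss, parse_iss_alt, parse_iss_go_eq]
  simp
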